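-- pv_equiv track=rewrite | github.com/MihaiBlebea/Hangman | writer.py | hide_letters
-- ===== SOURCE A (Python) =====
-- def hide_letters(word):
--     letters = list(word)
--
--     result = []
--     for index, letter in enumerate(letters):
--         if index == 0:
--             result.append(letter)
--         elif index == len(letters) - 1:
--             result.append(letter)
--         else:
--             result.append("_")
--
--     return "".join(result)
-- ===== SOURCE B (Python) =====
-- def hide_letters(word):
--     if len(word) <= 2:
--         return word
--     return word[0] + "_" * (len(word) - 2) + word[-1]
-- ===== Notes on version B (the rewrite author's own statement) =====
-- stated objective: idiomatic
-- what changed: Replaces the per-index enumerate loop with a closed-form expression: words of length at most 2 are returned unchanged, otherwise first char + a replicated underscore interior + last char.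
import Mathlib
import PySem

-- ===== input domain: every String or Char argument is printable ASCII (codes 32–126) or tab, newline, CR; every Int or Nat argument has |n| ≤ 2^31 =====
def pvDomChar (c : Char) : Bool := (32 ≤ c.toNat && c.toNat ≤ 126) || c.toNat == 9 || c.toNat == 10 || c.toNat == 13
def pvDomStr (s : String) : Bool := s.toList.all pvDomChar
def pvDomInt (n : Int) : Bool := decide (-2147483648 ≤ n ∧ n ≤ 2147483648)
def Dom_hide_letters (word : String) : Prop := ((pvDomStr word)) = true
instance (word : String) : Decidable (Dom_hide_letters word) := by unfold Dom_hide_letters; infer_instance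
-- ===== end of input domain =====

-- B replaces A's per-index enumerate loop with a closed-form guard + slice expression (same O(n) cost).

-- ===== PORT A =====
-- letters = list(word); result accumulated by the enumerate loop; "".join(result)
def hide_letters (word : String) : String :=
  let letters := word.toList
  let result :=
    (PySem.List.enumerate letters 0).foldl
      (fun acc p =>
        acc ++ [if p.1 = 0 then p.2
                else if p.1 = (letters.length : Int) - 1 then p.2
                else '_']) []
  String.ofList result

-- ===== PORT B =====
-- if len(word) <= 2: return word; else word[0] + "_" * (len(word) - 2) + word[-1]
-- (word[0] is take 1, word[-1] is drop (n-1): exact here since the branch has n ≥ 3)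
def hide_letters_alt (word : String) : String :=
  let cs := word.toList
  if cs.length ≤ 2 then word
  else String.ofList (cs.take 1 ++ List.replicate (cs.length - 2) '_' ++ cs.drop (cs.length - 1))

-- ===== PRECONDITION & SPEC =====
def Spec_hide_letters (word : String) (out : String) : Prop := out = hide_letters_alt word
instance (word : String) (out : String) : Decidable (Spec_hide_letters word out) := by unfold Spec_hide_letters; infer_instance

-- ===== CLAIM (what is proved, stated in full; the proofs are below) =====
def Claim_equal_hide_letters : Prop := ∀ (word : String), Dom_hide_letters word → Spec_hide_letters word (hide_letters word)

-- ===== LEMMAS AND PROOFS =====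

-- the interior of the loop: from start index s ≥ 1, every position masks to '_' except the last
theorem hide_mask_interior (t : List Char) (s : Nat) (m : Int)
    (hs : 1 ≤ s) (hm : (s : Int) + t.length - 1 = m) (ht : t ≠ []) :
    (PySem.List.enumerate t (s : Int)).map
      (fun p => if p.1 = 0 then p.2 else if p.1 = m then p.2 else '_')
    = List.replicate (t.length - 1) '_' ++ t.drop (t.length - 1) := by
  induction t generalizing s with
  | nil => exact absurd rfl ht
  | cons x t' ih =>
    rw [PySem.List.enumerate_cons]
    cases t' with
    | nil =>
      simp only [List.length_cons, List.length_nil] at hm ⊢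
      have h0 : (s : Int) ≠ 0 := by omega
      have h1 : (s : Int) = m := by omega
      simp [PySem.List.enumerate_nil, h1]
    | cons y r =>
      have h0 : (s : Int) ≠ 0 := by omega
      have h1 : (s : Int) ≠ m := by
        simp only [List.length_cons] at hm; push_cast at hm; omega
      have hm' : ((s + 1 : Nat) : Int) + (y :: r).length - 1 = m := by
        simp only [List.length_cons] at hm ⊢; push_cast at hm ⊢; omega
      have := ih (s + 1) (by omega) hm' (by simp)
      push_cast at this
      simp only [List.map_cons, h0, h1, if_false]
      rw [this]
      simp [List.replicate_succ, List.length_cons]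

theorem mask_chars (cs : List Char) :
    (PySem.List.enumerate cs 0).map
      (fun p => if p.1 = 0 then p.2 else if p.1 = (cs.length : Int) - 1 then p.2 else '_')
    = if cs.length ≤ 2 then cs
      else cs.take 1 ++ List.replicate (cs.length - 2) '_' ++ cs.drop (cs.length - 1) := by
  cases cs with
  | nil => simp [PySem.List.enumerate_nil]
  | cons a t =>
    cases t with
    | nil => simp [PySem.List.enumerate_cons, PySem.List.enumerate_nil]
    | cons b r =>
      cases r with
      | nil =>
        simp [PySem.List.enumerate_cons, PySem.List.enumerate_nil]
      | cons c r' =>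
        have hlen : ¬ (a :: b :: c :: r').length ≤ 2 := by simp
        rw [if_neg hlen]
        rw [PySem.List.enumerate_cons]
        have hmask := hide_mask_interior (b :: c :: r') 1
          (((a :: b :: c :: r').length : Int) - 1) le_rfl
          (by push_cast [List.length_cons]; ring) (by simp)
        simp only [List.map_cons, Nat.cast_one] at hmask ⊢
        norm_num at hmask ⊢
        rw [hmask]
        simp [List.replicate_succ]

theorem hide_letters_eq (word : String) : hide_letters word = hide_letters_alt word := by
  unfold hide_letters hide_letters_alt
  dsimp only
  rw [PySem.List.foldl_append_singleton_eq_map, List.nil_append]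
  have h := mask_chars word.toList
  by_cases hlen : word.toList.length ≤ 2
  · rw [if_pos hlen] at h
    rw [h, String.ofList_toList, if_pos hlen]
  · rw [if_neg hlen] at h
    rw [h, if_neg hlen]

-- ===== VERDICT (by name: the statement is the Claim_ definition above) =====
theorem hide_letters_spec : Claim_equal_hide_letters := by
  intro word _
  unfold Spec_hide_letters
  exact hide_letters_eq word
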